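-- pv_equiv track=rewrite | github.com/longsizhuo/AlgorithmPractice | loong's code/contest/PTA TOP/1-7.py | process_linked_list
-- ===== SOURCE A (Python) =====
-- def process_linked_list(head_addr, nodes):
--     seen = set()
--     unique_list_head = unique_list_tail = None
--     removed_list_head = removed_list_tail = None
--     current_addr = head_addr
--
--     # 新增变量用于处理头节点是重复节点的情况
--     new_head_found = False
--
--     while current_addr != '-1':
--         value, next_addr = nodes[current_addr]
--         abs_value = abs(value)
--
--         if abs_value not in seen:
--             seen.add(abs_value)
--             if not unique_list_head:
--                 unique_list_head = current_addr
--                 new_head_found = True  # 找到了新的头节点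
--             if unique_list_tail:
--                 nodes[unique_list_tail] = (nodes[unique_list_tail][0], current_addr)
--             unique_list_tail = current_addr
--         else:
--             if not removed_list_head:
--                 removed_list_head = current_addr
--             if removed_list_tail:
--                 nodes[removed_list_tail] = (nodes[removed_list_tail][0], current_addr)
--             removed_list_tail = current_addr
--
--         current_addr = next_addr
--
--     if unique_list_tail:
--         nodes[unique_list_tail] = (nodes[unique_list_tail][0], '-1')
--     if removed_list_tail:
--         nodes[removed_list_tail] = (nodes[removed_list_tail][0], '-1')
--
--     # 如果原始头节点是重复的，更新头节点地址
--     if not new_head_found: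
--         unique_list_head = '-1'
--
--     return unique_list_head, removed_list_head
-- ===== SOURCE B (Python) =====
-- def process_linked_list(head_addr, nodes):
--     # Two-phase: classify addresses by first-seen abs(value), then relink each sublist.
--     seen = set()
--     unique_addrs = []
--     removed_addrs = []
--     addr = head_addr
--     while addr != '-1':
--         value, nxt = nodes[addr]
--         if abs(value) in seen:
--             removed_addrs.append(addr)
--         else:
--             seen.add(abs(value))
--             unique_addrs.append(addr)
--         addr = nxt
--     for chain in (unique_addrs, removed_addrs):
--         for a, b in zip(chain, chain[1:]):
--             nodes[a] = (nodes[a][0], b)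
--         if chain:
--             last = chain[-1]
--             nodes[last] = (nodes[last][0], '-1')
--     unique_head = unique_addrs[0] if unique_addrs else '-1'
--     removed_head = removed_addrs[0] if removed_addrs else None
--     return unique_head, removed_head
-- ===== Notes on version B (the rewrite author's own statement) =====
-- stated objective: alternative
-- what changed: A interleaves classification, head/tail bookkeeping and in-place relinking in one truthiness-driven while loop; B first collects the unique/removed address lists in a read-only pass keyed by first-seen abs(value), then relinks each list by zipping consecutive pairs and takes the heads from the lists.
-- outside the precondition, e.g. on process_linked_list('', {'': (1, 'x'), 'x': (2, '-1')}): A returns ('x', None), B returns ('', None)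
import Mathlib
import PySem

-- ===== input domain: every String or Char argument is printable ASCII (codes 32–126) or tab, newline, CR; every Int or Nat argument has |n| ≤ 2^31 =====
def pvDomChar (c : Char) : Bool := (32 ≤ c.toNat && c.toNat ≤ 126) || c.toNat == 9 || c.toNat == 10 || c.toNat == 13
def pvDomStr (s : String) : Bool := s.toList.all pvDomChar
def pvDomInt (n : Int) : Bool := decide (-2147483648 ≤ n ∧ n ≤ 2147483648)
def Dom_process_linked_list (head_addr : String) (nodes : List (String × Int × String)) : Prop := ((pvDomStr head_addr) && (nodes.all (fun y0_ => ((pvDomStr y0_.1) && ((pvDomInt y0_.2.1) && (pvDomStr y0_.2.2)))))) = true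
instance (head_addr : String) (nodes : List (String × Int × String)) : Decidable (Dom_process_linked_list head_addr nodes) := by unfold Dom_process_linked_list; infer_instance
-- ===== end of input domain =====

-- B replaces A's single truthiness-driven mutate-while-you-walk loop by a read-only classification
-- pass followed by a separate relinking pass (objective: alternative decomposition, same O(n) cost).
-- Both Pythons mutate the `nodes` dict in place identically; the equivalence proved here is about
-- the RETURN value only.


-- ===== PORT A =====
-- Python truthiness of an Option String variable holding None or an address ('' is falsy too)
def pvFalsy : Option String → Bool
  | none => true
  | some s => s == ""

-- nodes[t] = (nodes[t][0], nxt)  (on a missing key Python would raise; outside Pre_)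
def pvSetNext (d : PySem.Dict String (Int × String)) (t nxt : String) :
    PySem.Dict String (Int × String) :=
  match d.get? t with
  | some (v, _) => d.insert t (v, nxt)
  | none => d

-- the conditional 'if tail: nodes[tail] = (nodes[tail][0], cur)' statements of A's loop
def pvTailWrite (d : PySem.Dict String (Int × String)) (t : Option String) (cur : String) :
    PySem.Dict String (Int × String) :=
  if pvFalsy t then d else
    match t with
    | some a => pvSetNext d a cur
    | none => d

-- A's while loop; state = (nodes, unique_head, unique_tail, removed_head, removed_tail, new_head_found)
def pvALoop : Nat → PySem.Dict String (Int × String) → PySem.Set Int →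
    Option String → Option String → Option String → Option String → Bool → String →
    (PySem.Dict String (Int × String) ×
      Option String × Option String × Option String × Option String × Bool)
  | 0, d, _, uh, ut, rh, rt, nhf, _ => (d, uh, ut, rh, rt, nhf)
  | fuel+1, d, seen, uh, ut, rh, rt, nhf, cur =>
    if cur = "-1" then (d, uh, ut, rh, rt, nhf)
    else
      match d.get? cur with
      | none => (d, uh, ut, rh, rt, nhf)   -- KeyError in Python; outside Pre_
      | some (value, nextAddr) =>
        let absValue : Int := if value < 0 then -value else value
        if PySem.Set.contains seen absValue = false then
          let seen' := PySem.Set.add seen absValue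
          let uh' := if pvFalsy uh then some cur else uh
          let nhf' := if pvFalsy uh then true else nhf
          let d' := pvTailWrite d ut cur
          pvALoop fuel d' seen' uh' (some cur) rh rt nhf' nextAddr
        else
          let rh' := if pvFalsy rh then some cur else rh
          let d' := pvTailWrite d rt cur
          pvALoop fuel d' seen uh ut rh' (some cur) nhf nextAddr

-- nodes[tail] = (nodes[tail][0], '-1') when the tail is truthy
def pvAFinalize (d : PySem.Dict String (Int × String)) (t : Option String) :
    PySem.Dict String (Int × String) :=
  if pvFalsy t then d else
    match t with
    | some a => pvSetNext d a "-1"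
    | none => d

def process_linked_list (head_addr : String) (nodes : List (String × Int × String)) :
    Option String × Option String :=
  let d := PySem.Dict.ofList nodes
  let st := pvALoop (nodes.length + 1) d PySem.Set.empty none none none none false head_addr
  -- trailing in-place writes mutate only the nodes dict, which the return value does not read
  let _nodes := pvAFinalize (pvAFinalize st.1 st.2.2.1) st.2.2.2.2.1
  let uh := if st.2.2.2.2.2 = false then some "-1" else st.2.1
  (uh, st.2.2.2.1)

-- ===== PORT B =====
-- first pass of Source B: walk the original pointers, splitting the addresses into
-- (unique_addrs, removed_addrs) by first-seen abs(value); no mutation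
def pvClassify : Nat → PySem.Dict String (Int × String) → PySem.Set Int → String →
    (List String × List String)
  | 0, _, _, _ => ([], [])
  | fuel+1, d, seen, addr =>
    if addr = "-1" then ([], [])
    else
      match d.get? addr with
      | none => ([], [])   -- KeyError in Python; outside Pre_
      | some (v, nxt) =>
        let a : Int := if v < 0 then -v else v
        if PySem.Set.contains seen a then
          let p := pvClassify fuel d seen nxt
          (p.1, addr :: p.2)
        else
          let p := pvClassify fuel d (PySem.Set.add seen a) nxt
          (addr :: p.1, p.2)

-- second pass of Source B: relink one address list (mutates only the nodes dict)
def pvRelink (d : PySem.Dict String (Int × String)) (chain : List String) :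
    PySem.Dict String (Int × String) :=
  let d := (chain.zip chain.tail).foldl (fun d p => pvSetNext d p.1 p.2) d
  match chain.getLast? with
  | some last => pvSetNext d last "-1"
  | none => d

def process_linked_list_alt (head_addr : String) (nodes : List (String × Int × String)) :
    Option String × Option String :=
  let d := PySem.Dict.ofList nodes
  let p := pvClassify (nodes.length + 1) d PySem.Set.empty head_addr
  -- the relinking passes mutate only the nodes dict, which the return value does not read
  let _nodes := pvRelink (pvRelink d p.1) p.2
  (some (p.1.headD "-1"), p.2.head?)

-- ===== PRECONDITION & SPEC =====
-- does head reach '-1' through existing keys without revisiting an address, all addresses nonempty?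
def pvChainOk : Nat → PySem.Dict String (Int × String) → String → List String → Bool
  | 0, _, cur, _ => cur == "-1"
  | fuel+1, d, cur, visited =>
    cur == "-1" ||
      (!(cur == "") && !(visited.contains cur) &&
        match d.get? cur with
        | none => false
        | some (_, nxt) => pvChainOk fuel d nxt (cur :: visited))

-- Pre_ = the natural well-formedness of the linked-list input: the chain from head_addr reaches
-- '-1' through existing keys without revisiting an address (on a cycle A loops forever, on a
-- missing key it raises KeyError) and without the empty string as an address (a degenerate corner
-- no caller would specify: Python's truthiness conflates the address '' with None, so A's and B's
-- head choices there are both accidental and differ).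
def Pre_process_linked_list (head_addr : String) (nodes : List (String × Int × String)) : Prop :=
  pvChainOk (nodes.length + 1) (PySem.Dict.ofList nodes) head_addr [] = true
instance (head_addr : String) (nodes : List (String × Int × String)) : Decidable (Pre_process_linked_list head_addr nodes) := by unfold Pre_process_linked_list; infer_instance

def pvWitness_process_linked_list : String × (List (String × Int × String)) :=
  ("a", [("a", 1, "b"), ("b", -1, "-1")])

def Spec_process_linked_list (head_addr : String) (nodes : List (String × Int × String)) (out : Option String × Option String) : Prop := out = process_linked_list_alt head_addr nodes
instance (head_addr : String) (nodes : List (String × Int × String)) (out : Option String × Option String) : Decidable (Spec_process_linked_list head_addr nodes out) := by unfold Spec_process_linked_list; infer_instance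

-- ===== CLAIM (what is proved, stated in full; the proofs are below) =====
def Claim_equal_process_linked_list : Prop := ∀ (head_addr : String) (nodes : List (String × Int × String)), Dom_process_linked_list head_addr nodes → Pre_process_linked_list head_addr nodes → Spec_process_linked_list head_addr nodes (process_linked_list head_addr nodes)

-- ===== LEMMAS AND PROOFS =====
lemma pvFalsy_eq_isNone (o : Option String) (h : ∀ a, o = some a → a ≠ "") :
    pvFalsy o = o.isNone := by
  cases o with
  | none => rfl
  | some a => simp [pvFalsy, h a rfl]

lemma pvLoop_eq (fuel : Nat) :
    ∀ (d0 d : PySem.Dict String (Int × String)) (visited : List String)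
      (seen : PySem.Set Int) (cur : String)
      (uh ut rh rt : Option String) (nhf : Bool),
      pvChainOk fuel d0 cur visited = true →
      (∀ k, k ∉ visited → d.get? k = d0.get? k) →
      (∀ t, ut = some t → t ∈ visited ∧ t ≠ "") →
      (∀ t, rt = some t → t ∈ visited ∧ t ≠ "") →
      (∀ a, uh = some a → a ≠ "") →
      (∀ a, rh = some a → a ≠ "") →
      ((pvALoop fuel d seen uh ut rh rt nhf cur).2.1 =
          (match uh with
           | some _ => uh
           | none => (pvClassify fuel d0 seen cur).1.head?)) ∧
      ((pvALoop fuel d seen uh ut rh rt nhf cur).2.2.2.1 =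
          (match rh with
           | some _ => rh
           | none => (pvClassify fuel d0 seen cur).2.head?)) ∧
      ((pvALoop fuel d seen uh ut rh rt nhf cur).2.2.2.2.2 =
          (nhf || (uh.isNone && !(pvClassify fuel d0 seen cur).1.isEmpty))) := by
  induction fuel with
  | zero =>
    intro d0 d visited seen cur uh ut rh rt nhf hchain hagree hut hrt huh hrh
    refine ⟨?_, ?_, ?_⟩ <;> cases uh <;> cases rh <;> simp [pvALoop, pvClassify]
  | succ fuel ih =>
    intro d0 d visited seen cur uh ut rh rt nhf hchain hagree hut hrt huh hrh
    by_cases hcur : cur = "-1"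
    · refine ⟨?_, ?_, ?_⟩ <;> cases uh <;> cases rh <;> simp [pvALoop, pvClassify, hcur]
    · simp only [pvChainOk, Bool.or_eq_true, beq_iff_eq, hcur, false_or, Bool.and_eq_true,
        Bool.not_eq_true'] at hchain
      obtain ⟨⟨hne, hnvis⟩, hrest⟩ := hchain
      have hsplit : ∃ v nxt, d0.get? cur = some (v, nxt) ∧
          pvChainOk fuel d0 nxt (cur :: visited) = true := by
        revert hrest
        cases d0.get? cur with
        | none => intro h; simp at h
        | some p => intro h; exact ⟨p.1, p.2, rfl, by simpa using h⟩
      obtain ⟨v, nxt, hget0, hrest⟩ := hsplit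
      have hcurnv : cur ∉ visited := by
        simpa using hnvis
      have hget : d.get? cur = some (v, nxt) := by rw [hagree cur hcurnv, hget0]
      have hne' : cur ≠ "" := by simpa using hne
      -- agreement for the extended visited set after a possible tail write
      have hagree' : ∀ (t : Option String), (∀ a, t = some a → a ∈ visited ∧ a ≠ "") →
          ∀ k, k ∉ cur :: visited →
            (pvTailWrite d t cur).get? k = d0.get? k := by
        intro t ht k hk
        simp only [List.mem_cons, not_or] at hk
        unfold pvTailWrite
        cases t with
        | none => exact hagree k hk.2
        | some a =>
          have hav := (ht a rfl).1
          have hane := (ht a rfl).2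
          have hka : k ≠ a := fun h => hk.2 (h ▸ hav)
          have hf : pvFalsy (some a) = false := by simp [pvFalsy, hane]
          rw [hf]
          simp only [Bool.false_eq_true, if_false]
          unfold pvSetNext
          cases hda : d.get? a with
          | none => exact hagree k hk.2
          | some p =>
            exact (PySem.Dict.get?_insert_of_ne d (p.1, cur) hka).trans (hagree k hk.2)
      by_cases hseen : PySem.Set.contains seen (if v < 0 then -v else v) = false
      · -- unique branch
        have hf : pvFalsy uh = uh.isNone := pvFalsy_eq_isNone uh huh
        have hstep : pvALoop (fuel+1) d seen uh ut rh rt nhf cur =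
            pvALoop fuel (pvTailWrite d ut cur)
              (PySem.Set.add seen (if v < 0 then -v else v))
              (if pvFalsy uh then some cur else uh) (some cur) rh rt
              (if pvFalsy uh then true else nhf) nxt := by
          have hmem : (if v < 0 then -v else v) ∉ seen := by simpa using hseen
          simp [pvALoop, hcur, hget, hmem]
        have hclass : pvClassify (fuel+1) d0 seen cur =
            (cur :: (pvClassify fuel d0 (PySem.Set.add seen (if v < 0 then -v else v)) nxt).1,
             (pvClassify fuel d0 (PySem.Set.add seen (if v < 0 then -v else v)) nxt).2) := by
          have hmem : (if v < 0 then -v else v) ∉ seen := by simpa using hseen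
          simp [pvClassify, hcur, hget0, hmem]
        have hrec := ih d0 _ (cur :: visited)
            (PySem.Set.add seen (if v < 0 then -v else v)) nxt
            (if pvFalsy uh then some cur else uh) (some cur) rh rt
            (if pvFalsy uh then true else nhf) hrest
            (hagree' ut hut)
            (fun t h => by cases h; exact ⟨by simp, hne'⟩)
            (fun t h => ⟨List.mem_cons_of_mem _ (hrt t h).1, (hrt t h).2⟩)
            (fun a ha => by
              cases uh with
              | none => simp [pvFalsy] at ha; exact ha ▸ hne'
              | some b =>
                rw [hf] at ha
                simp at ha
                exact ha ▸ huh b rfl)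
            hrh
        rw [hstep, hclass]
        refine ⟨?_, ?_, ?_⟩
        · rw [hrec.1]
          cases uh with
          | none => simp [pvFalsy]
          | some b => simp [pvFalsy, huh b rfl]
        · rw [hrec.2.1]
        · rw [hrec.2.2]
          cases uh with
          | none => simp [pvFalsy]
          | some b => simp [pvFalsy, huh b rfl]
      · -- removed branch
        simp only [Bool.not_eq_false] at hseen
        have hf : pvFalsy rh = rh.isNone := pvFalsy_eq_isNone rh hrh
        have hstep : pvALoop (fuel+1) d seen uh ut rh rt nhf cur =
            pvALoop fuel (pvTailWrite d rt cur)
              seen uh ut (if pvFalsy rh then some cur else rh) (some cur) nhf nxt := by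
          have hmem : (if v < 0 then -v else v) ∈ seen := by simpa using hseen
          simp [pvALoop, hcur, hget, hmem]
        have hclass : pvClassify (fuel+1) d0 seen cur =
            ((pvClassify fuel d0 seen nxt).1,
             cur :: (pvClassify fuel d0 seen nxt).2) := by
          have hmem : (if v < 0 then -v else v) ∈ seen := by simpa using hseen
          simp [pvClassify, hcur, hget0, hmem]
        have hrec := ih d0 _ (cur :: visited) seen nxt
            uh ut (if pvFalsy rh then some cur else rh) (some cur) nhf hrest
            (hagree' rt hrt)
            (fun t h => ⟨List.mem_cons_of_mem _ (hut t h).1, (hut t h).2⟩)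
            (fun t h => by cases h; exact ⟨by simp, hne'⟩)
            huh
            (fun a ha => by
              cases rh with
              | none => simp [pvFalsy] at ha; exact ha ▸ hne'
              | some b =>
                rw [hf] at ha
                simp at ha
                exact ha ▸ hrh b rfl)
        rw [hstep, hclass]
        refine ⟨?_, ?_, ?_⟩
        · rw [hrec.1]
        · rw [hrec.2.1]
          cases rh with
          | none => simp [pvFalsy]
          | some b => simp [pvFalsy, hrh b rfl]
        · rw [hrec.2.2]

theorem process_linked_list_spec : Claim_equal_process_linked_list := by
  intro head nodes _hdom hpre
  unfold Pre_process_linked_list at hpre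
  unfold Spec_process_linked_list process_linked_list process_linked_list_alt
  obtain ⟨h1, h2, h3⟩ := pvLoop_eq (nodes.length + 1) (PySem.Dict.ofList nodes)
      (PySem.Dict.ofList nodes) [] PySem.Set.empty head none none none none false
      hpre (fun _ _ => rfl) (fun t h => by cases h) (fun t h => by cases h)
      (fun a h => by cases h) (fun a h => by cases h)
  simp only [h1, h2, h3]
  cases (pvClassify (nodes.length + 1) (PySem.Dict.ofList nodes) PySem.Set.empty head).1 <;> simp
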